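-- pv_equiv track=rewrite | github.com/safwannazir911/compiler_design | lab1/countWhitespace.py | replaceWhitespcaes
-- ===== SOURCE A (Python) =====
-- def replaceWhitespcaes(text:str):
--     reptext = """"""
--     nb,nt,nnl =0,0,0
--
--     for i in range(len(text)):
--         if text[i] == '\n':
--             reptext+=("$")
--             nnl += 1
--
--         elif text[i] == '\t':
--             reptext+=("^")
--             nt += 1
--
--         elif text[i] == " ":
--             reptext+=("&")
--             nb += 1
--
--         else:
--             reptext+=(text[i])
--
--     return reptext,nb,nt,nnl
-- ===== SOURCE B (Python) =====
-- def replaceWhitespcaes(text: str):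
--     reptext = text.translate(str.maketrans({'\n': '$', '\t': '^', ' ': '&'}))
--     return reptext, text.count(' '), text.count('\t'), text.count('\n')
-- ===== Notes on version B (the rewrite author's own statement) =====
-- stated objective: faster
-- what changed: The character-by-character branching loop with repeated string concatenation is replaced by a single table-driven str.translate plus three independent str.count scans.
import Mathlib
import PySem

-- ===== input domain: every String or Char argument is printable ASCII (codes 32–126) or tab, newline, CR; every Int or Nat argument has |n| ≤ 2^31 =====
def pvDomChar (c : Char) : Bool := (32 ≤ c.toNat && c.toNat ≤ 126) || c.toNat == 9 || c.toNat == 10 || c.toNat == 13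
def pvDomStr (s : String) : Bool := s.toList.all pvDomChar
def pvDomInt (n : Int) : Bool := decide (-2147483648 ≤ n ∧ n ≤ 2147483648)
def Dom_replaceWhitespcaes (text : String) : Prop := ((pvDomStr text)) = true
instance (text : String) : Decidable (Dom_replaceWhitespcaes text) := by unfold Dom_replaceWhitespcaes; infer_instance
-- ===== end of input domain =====

-- B replaces A's branching accumulation loop with a table-driven translate plus three independent count scans (idiomatic).


-- ===== PORT A =====
-- the for-loop over text[i], carrying (reptext, nb, nt, nnl) exactly as A does
def pvAloop : List Char → List Char → Int → Int → Int → (List Char × Int × Int × Int)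
  | [], rep, nb, nt, nnl => (rep, nb, nt, nnl)
  | c :: cs, rep, nb, nt, nnl =>
    if c = '\n' then pvAloop cs (rep ++ ['$']) nb nt (nnl + 1)
    else if c = '\t' then pvAloop cs (rep ++ ['^']) nb (nt + 1) nnl
    else if c = ' ' then pvAloop cs (rep ++ ['&']) (nb + 1) nt nnl
    else pvAloop cs (rep ++ [c]) nb nt nnl

def replaceWhitespcaes (text : String) : String × Int × Int × Int :=
  let r := pvAloop text.toList [] 0 0 0
  (String.ofList r.1, r.2.1, r.2.2.1, r.2.2.2)

-- ===== PORT B =====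
-- the translation table str.maketrans({'\n':'$','\t':'^',' ':'&'}) as a function on chars
def pvTr (c : Char) : Char :=
  if c = '\n' then '$' else if c = '\t' then '^' else if c = ' ' then '&' else c

-- text.translate(table) = map the table over the chars; text.count(c) for a single
-- character is exactly List.count on the code points (ported as the corresponding Lean function)
def replaceWhitespcaes_alt (text : String) : String × Int × Int × Int :=
  (String.ofList (text.toList.map pvTr),
   (text.toList.count ' ' : Int), (text.toList.count '\t' : Int), (text.toList.count '\n' : Int))

-- ===== PRECONDITION & SPEC =====
def Spec_replaceWhitespcaes (text : String) (out : String × Int × Int × Int) : Prop := out = replaceWhitespcaes_alt text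
instance (text : String) (out : String × Int × Int × Int) : Decidable (Spec_replaceWhitespcaes text out) := by unfold Spec_replaceWhitespcaes; infer_instance

-- ===== CLAIM (what is proved, stated in full; the proofs are below) =====
def Claim_equal_replaceWhitespcaes : Prop := ∀ (text : String), Dom_replaceWhitespcaes text → Spec_replaceWhitespcaes text (replaceWhitespcaes text)

-- ===== LEMMAS AND PROOFS =====
-- loop invariant of A's pass: it appends the translated chars and adds the three counts
theorem pvAloop_eq (cs rep : List Char) (nb nt nnl : Int) :
    pvAloop cs rep nb nt nnl =
      (rep ++ cs.map pvTr, nb + cs.count ' ', nt + cs.count '\t', nnl + cs.count '\n') := by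
  induction cs generalizing rep nb nt nnl with
  | nil => simp [pvAloop]
  | cons c cs ih =>
    by_cases h1 : c = '\n'
    · subst h1; simp [pvAloop, ih, pvTr]; ring
    · by_cases h2 : c = '\t'
      · subst h2; simp [pvAloop, ih, pvTr]; ring
      · by_cases h3 : c = ' '
        · subst h3; simp [pvAloop, ih, pvTr]; ring
        · simp [pvAloop, h1, h2, h3, ih, pvTr]

-- ===== VERDICT (by name: the statement is the Claim_ definition above) =====
theorem replaceWhitespcaes_spec : Claim_equal_replaceWhitespcaes := by
  intro text _
  unfold Spec_replaceWhitespcaes replaceWhitespcaes replaceWhitespcaes_alt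
  simp [pvAloop_eq]
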